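-- pv_equiv track=rewrite | github.com/mrioshe/LearningPython | programmingFundamental_UNAL/M10/p5.py | bandera
-- ===== SOURCE A (Python) =====
-- def bandera(L):
--     l1=[]
--     for n in range(L):
--         l1.append([])
--         for b in range(L):
--             l1[n].append('0')
--     for k in range(L):
--         l1[k][int((L-1)/2)]='+'
--     for p in range(L):
--         l1[int((L-1)/2)][p]='+'
--     for f in range(L):
--         for m in range(L):
--             if f == m or m+f==L-1 :
--                 l1[m][f]='#'
--     l2=[]
--     for z in range(L):
--         l2.append(''.join(l1[z]))
--     return(l2)
-- ===== SOURCE B (Python) =====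
-- def bandera(L):
--     c = (L - 1) // 2
--     out = []
--     for m in range(L):
--         row = []
--         for f in range(L):
--             if f == m or m + f == L - 1:
--                 row.append('#')
--             elif f == c or m == c:
--                 row.append('+')
--             else:
--                 row.append('0')
--         out.append(''.join(row))
--     return out
-- ===== Notes on version B (the rewrite author's own statement) =====
-- stated objective: simpler
-- what changed: A builds an L×L mutable grid and overwrites it in four passes (init '0', vertical '+', horizontal '+', diagonals '#'); B emits each row in a single pass, deciding every cell directly by priority ('#' for diagonals, then '+' for the middle row/column, else '0').
import Mathlib
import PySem

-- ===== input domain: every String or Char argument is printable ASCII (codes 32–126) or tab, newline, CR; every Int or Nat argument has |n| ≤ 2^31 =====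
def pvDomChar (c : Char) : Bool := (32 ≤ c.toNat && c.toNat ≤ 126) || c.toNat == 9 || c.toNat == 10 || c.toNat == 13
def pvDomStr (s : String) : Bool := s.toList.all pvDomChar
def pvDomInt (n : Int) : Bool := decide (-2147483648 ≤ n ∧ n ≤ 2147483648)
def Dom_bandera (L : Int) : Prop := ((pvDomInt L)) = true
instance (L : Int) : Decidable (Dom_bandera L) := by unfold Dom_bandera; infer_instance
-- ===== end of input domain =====

-- B replaces A's four overwrite passes over a mutable grid with one decision per cell ('#' before '+', else '0'); objective: simpler.

-- ===== PORT A =====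
-- Item assignments l1[i][j] = v are ported with List.modify / List.set; every index used
-- (loop variables < L and the column int((L-1)/2) < L) is in range, so this is exact.
def bandera (L : Int) : List String :=
  let l1 : List (List Char) :=
    (PySem.List.pyRange 0 L 1).foldl (fun a n =>
      (PySem.List.pyRange 0 L 1).foldl (fun a2 _ => a2.modify n.toNat (fun row => row ++ ['0']))
        (a ++ [[]])) []
  let l1 := (PySem.List.pyRange 0 L 1).foldl (fun a k =>
      a.modify k.toNat (fun row => row.set (PySem.Int.truncdiv (L - 1) 2).toNat '+')) l1
  let l1 := (PySem.List.pyRange 0 L 1).foldl (fun a p =>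
      a.modify (PySem.Int.truncdiv (L - 1) 2).toNat (fun row => row.set p.toNat '+')) l1
  let l1 := (PySem.List.pyRange 0 L 1).foldl (fun a f =>
      (PySem.List.pyRange 0 L 1).foldl (fun a2 m =>
        if f = m ∨ m + f = L - 1 then a2.modify m.toNat (fun row => row.set f.toNat '#')
        else a2) a) l1
  (PySem.List.pyRange 0 L 1).foldl (fun l2 z => l2 ++ [String.mk (PySem.List.pyGetD l1 z [])]) []

-- ===== PORT B =====
def bandera_alt (L : Int) : List String :=
  let c := PySem.Int.floordiv (L - 1) 2
  (PySem.List.pyRange 0 L 1).foldl (fun out m =>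
    out ++ [String.mk ((PySem.List.pyRange 0 L 1).foldl (fun row f =>
      row ++ [if f = m ∨ m + f = L - 1 then '#' else if f = c ∨ m = c then '+' else '0']) [])]) []

-- ===== PRECONDITION & SPEC =====
def Spec_bandera (L : Int) (out : List String) : Prop := out = bandera_alt L
instance (L : Int) (out : List String) : Decidable (Spec_bandera L out) := by unfold Spec_bandera; infer_instance

-- ===== CLAIM (what is proved, stated in full; the proofs are below) =====
def Claim_equal_bandera : Prop := ∀ (L : Int), Dom_bandera L → Spec_bandera L (bandera L)

-- ===== LEMMAS AND PROOFS =====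

-- generic: a fold whose step preserves length preserves length
theorem pvFoldlLenPres {α β : Type} (step : List α → β → List α)
    (h : ∀ a b, (step a b).length = a.length) :
    ∀ (l : List β) (a : List α), (l.foldl step a).length = a.length := by
  intro l
  induction l with
  | nil => intro a; rfl
  | cons x xs ih => intro a; simp [List.foldl_cons, ih, h]

-- a pass over range j of (if cond k then modify k (g k)), pointwise
theorem pvCondModifyPass {α : Type} (cond : Nat → Prop) [DecidablePred cond] (g : Nat → α → α) :
    ∀ (j : Nat) (a : List α) (m : Nat),
    ((List.range j).foldl (fun acc k => if cond k then acc.modify k (g k) else acc) a)[m]? =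
      if m < j ∧ cond m then a[m]?.map (g m) else a[m]? := by
  intro j
  induction j with
  | zero => intro a m; simp
  | succ j ih =>
    intro a m
    rw [List.range_succ, List.foldl_append, List.foldl_cons, List.foldl_nil]
    by_cases hm : m = j
    · subst hm
      by_cases hc : cond m
      · simp [hc, List.getElem?_modify, ih]
      · simp [hc, ih]
    · have hlt : m < j + 1 ↔ m < j := by omega
      by_cases hc : cond j
      · simp only [hc, if_true, List.getElem?_modify, ih, hlt]
        rcases a[m]? with _ | v <;> split_ifs <;> simp_all
      · simp [hc, ih, hlt]

-- a pass over range j of (set p v) on a row, pointwise (f within the row)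
theorem pvSetPass {α : Type} (v : α) :
    ∀ (j : Nat) (r : List α) (f : Nat), f < r.length →
    ((List.range j).foldl (fun acc p => acc.set p v) r)[f]? =
      if f < j then some v else r[f]? := by
  intro j
  induction j with
  | zero => intro r f hf; simp
  | succ j ih =>
    intro r f hf
    rw [List.range_succ, List.foldl_append, List.foldl_cons, List.foldl_nil]
    have hlen : ((List.range j).foldl (fun acc p => acc.set p v) r).length = r.length :=
      pvFoldlLenPres _ (by intro a b; simp) _ _
    rw [List.getElem?_set, hlen]
    by_cases hj : j = f
    · subst hj; simp [hf]
    · have hlt : f < j + 1 ↔ f < j := by omega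
      simp only [hj, if_false, ih r f hf, hlt]

-- a pass over range j of (if cond f then set f v) on a row, pointwise (f within the row)
theorem pvCondSetPass {α : Type} (cond : Nat → Prop) [DecidablePred cond] (v : α) :
    ∀ (j : Nat) (r : List α) (f : Nat), f < r.length →
    ((List.range j).foldl (fun acc p => if cond p then acc.set p v else acc) r)[f]? =
      if f < j ∧ cond f then some v else r[f]? := by
  intro j
  induction j with
  | zero => intro r f hf; simp
  | succ j ih =>
    intro r f hf
    rw [List.range_succ, List.foldl_append, List.foldl_cons, List.foldl_nil]
    have hlen : ((List.range j).foldl (fun acc p => if cond p then acc.set p v else acc) r).length = r.length :=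
      pvFoldlLenPres _ (by intro a b; split <;> simp) _ _
    by_cases hj : j = f
    · subst hj
      by_cases hc : cond j
      · simp only [hc, if_true]
        rw [List.getElem?_set, hlen]
        simp [hf, hc]
      · simp [hc, ih r j hf]
    · have hlt : f < j + 1 ↔ f < j := by omega
      by_cases hc : cond j
      · simp only [hc, if_true]
        rw [List.getElem?_set, hlen]
        simp only [hj, if_false, ih r f hf, hlt]
      · simp [hc, ih r f hf, hlt]

-- unconditional modify pass
theorem pvModifyPass {α : Type} (g : Nat → α → α) (j : Nat) (a : List α) (m : Nat) :
    ((List.range j).foldl (fun acc k => acc.modify k (g k)) a)[m]? =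
      if m < j then a[m]?.map (g m) else a[m]? := by
  have h := pvCondModifyPass (fun _ => True) g j a m
  simpa using h

-- a pass that repeatedly modifies the SAME index k commutes to one modify of the inner fold
theorem pvPass3 {α : Type} (k : Nat) (g : Nat → α → α) :
    ∀ (j : Nat) (a : List α) (m : Nat),
    ((List.range j).foldl (fun acc p => acc.modify k (g p)) a)[m]? =
      if m = k then a[m]?.map (fun r => (List.range j).foldl (fun r p => g p r) r) else a[m]? := by
  intro j
  induction j with
  | zero =>
    intro a m
    simp only [List.range_zero, List.foldl_nil]
    cases h : a[m]? <;> split_ifs <;> simp [h]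
  | succ j ih =>
    intro a m
    rw [List.range_succ, List.foldl_append, List.foldl_cons, List.foldl_nil,
        List.getElem?_modify, ih]
    by_cases hm : m = k
    · subst hm
      simp only [if_pos rfl]
      cases h : a[m]? <;> simp [h, List.range_succ, List.foldl_append]
    · simp [hm, Ne.symm hm]

theorem pvModifyModify {α : Type} (a : List α) (k : Nat) (f g : α → α) :
    (a.modify k f).modify k g = a.modify k (fun x => g (f x)) := by
  apply List.ext_getElem?
  intro i
  simp only [List.getElem?_modify]
  rcases a[i]? with _ | v <;> simp <;> split <;> simp

-- inner init loop: appending '0' to row k, once per element of l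
theorem pvInnerInit {β : Type} (l : List β) (k : Nat) :
    ∀ (a : List (List Char)),
    l.foldl (fun a2 _ => a2.modify k (fun row => row ++ ['0'])) a =
      a.modify k (fun row => row ++ List.replicate l.length '0') := by
  induction l with
  | nil =>
    intro a
    simp only [List.foldl_nil, List.length_nil, List.replicate_zero, List.append_nil]
    apply List.ext_getElem?
    intro i
    simp [List.getElem?_modify]
  | cons x xs ih =>
    intro a
    rw [List.foldl_cons, ih, pvModifyModify]
    simp [List.replicate_succ]

theorem pvModifyAppendSingleton {α : Type} (a : List α) (x : α) (f : α → α) :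
    (a ++ [x]).modify a.length f = a ++ [f x] := by
  induction a with
  | nil => simp [List.modify]
  | cons y ys ih => simpa [List.modify] using ih

-- the init pass builds the j×n grid of '0'
theorem pvInit (n : Nat) :
    ∀ (j : Nat),
    ((List.range j).foldl (fun a k =>
        (List.range n).foldl (fun a2 _ => a2.modify k (fun row => row ++ ['0'])) (a ++ [[]])) []) =
      List.replicate j (List.replicate n '0') := by
  intro j
  induction j with
  | zero => simp
  | succ j ih =>
    rw [List.range_succ, List.foldl_append, List.foldl_cons, List.foldl_nil, ih, pvInnerInit]
    have h := pvModifyAppendSingleton (List.replicate j (List.replicate n '0')) ([])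
      (fun row => row ++ List.replicate (List.range n).length '0')
    rw [List.length_replicate] at h
    rw [h]
    simp [List.replicate_succ']

theorem bandera_spec_aux (L : Int) : bandera L = bandera_alt L := by
  by_cases hL : L ≤ 0
  · have hr : PySem.List.pyRange 0 L 1 = [] := by
      simp [PySem.List.pyRange]
      omega
    simp [bandera, bandera_alt, hr]
  · have hLn : L = (L.toNat : Int) := by omega
    generalize hn' : L.toNat = n at hLn
    have hn : 0 < n := by omega
    subst hLn
    have hrange := PySem.List.pyRange_zero_natCast n
    have htr : PySem.Int.truncdiv ((n:Int) - 1) 2 = (((n-1)/2 : Nat) : Int) := by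
      have h1 : ((n:Int)-1) = ((n-1 : Nat) : Int) := by omega
      rw [h1, PySem.Int.truncdiv, Int.tdiv_eq_ediv]
      simp
    have hfl : PySem.Int.floordiv ((n:Int) - 1) 2 = (((n-1)/2 : Nat) : Int) := by
      have h1 : ((n:Int)-1) = ((n-1 : Nat) : Int) := by omega
      rw [h1]
      exact_mod_cast PySem.Int.floordiv_natCast (n-1) 2
    simp only [bandera, bandera_alt, hrange, htr, hfl, List.foldl_map, Int.toNat_natCast,
      PySem.List.foldl_append_singleton_eq_map, List.nil_append, PySem.List.pyGetD_natCast,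
      pvInit]
    refine List.map_congr_left ?_
    intro m hm
    rw [List.mem_range] at hm
    congr 1
    have hcn : (n-1)/2 < n := by have := Nat.div_le_self (n-1) 2; omega
    set G0 := List.replicate n (List.replicate n '0') with hG0def
    set G1 := (List.range n).foldl (fun x y => x.modify y fun row => row.set ((n-1)/2) '+') G0 with hG1def
    set G2 := (List.range n).foldl (fun x y => x.modify ((n-1)/2) fun row => row.set y '+') G1 with hG2def
    have hpass4 : ∀ (j : Nat) (a : List (List Char)) (m : Nat), m < n →
        ((List.range j).foldl (fun (x : List (List Char)) (y : Nat) =>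
            (List.range n).foldl (fun (x2 : List (List Char)) (y2 : Nat) =>
              if (y:Int) = (y2:Int) ∨ (y2:Int) + (y:Int) = (n:Int) - 1 then x2.modify y2 (fun row => row.set y '#') else x2) x) a)[m]? =
          a[m]?.map (fun r => (List.range j).foldl
            (fun (r : List Char) (f : Nat) => if (f:Int) = (m:Int) ∨ (m:Int) + (f:Int) = (n:Int) - 1 then r.set f '#' else r) r) := by
      intro j
      induction j with
      | zero =>
        intro a m hm
        cases h : a[m]? <;> simp [h]
      | succ j ih =>
        intro a m hm
        rw [List.range_succ, List.foldl_append, List.foldl_cons, List.foldl_nil,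
          pvCondModifyPass (fun (y2 : Nat) => (j:Int) = (y2:Int) ∨ (y2:Int) + (j:Int) = (n:Int) - 1)
            (fun (_ : Nat) (row : List Char) => row.set j '#') n _ m, ih a m hm]
        by_cases hcond : (↑j:Int) = ↑m ∨ (↑m:Int) + ↑j = ↑n - 1
        · cases h : a[m]? <;>
            simp [h, hm, hcond, List.range_succ, List.foldl_append] <;>
            split <;> rfl
        · cases h : a[m]? <;>
            simp [h, hm, hcond, List.range_succ, List.foldl_append] <;>
            split <;> rfl
    have hG1row : ∀ m, m < n → G1[m]? = some ((List.replicate n '0').set ((n-1)/2) '+') := by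
      intro m hm
      rw [hG1def, pvModifyPass]
      simp [hm, hG0def, List.getElem?_replicate]
    have hG2row : G2[m]? = some (if m = (n-1)/2
        then (List.range n).foldl (fun r p => r.set p '+') ((List.replicate n '0').set ((n-1)/2) '+')
        else (List.replicate n '0').set ((n-1)/2) '+') := by
      rw [hG2def, pvPass3]
      by_cases h : m = (n-1)/2
      · subst h
        simp [hG1row _ hm]
      · simp [h, hG1row _ hm]
    -- the final row of A's grid
    rw [List.getD_eq_getElem?_getD, hpass4 n G2 m hm, hG2row]
    simp only [Option.map_some, Option.getD_some]
    -- row-level equality, pointwise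
    have hr2len : (if m = (n-1)/2
        then (List.range n).foldl (fun r p => r.set p '+') ((List.replicate n '0').set ((n-1)/2) '+')
        else (List.replicate n '0').set ((n-1)/2) '+').length = n := by
      split
      · rw [pvFoldlLenPres _ (by intro a b; simp)]
        simp
      · simp
    set r2 := (if m = (n-1)/2
        then (List.range n).foldl (fun r p => r.set p '+') ((List.replicate n '0').set ((n-1)/2) '+')
        else (List.replicate n '0').set ((n-1)/2) '+') with hr2def
    apply List.ext_getElem?
    intro f
    by_cases hf : f < n
    · rw [List.getElem?_map]
      have hrange_f : (List.range n)[f]? = some f := by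
        simp [List.getElem?_range, hf]
      rw [hrange_f]
      rw [pvCondSetPass (fun (p:Nat) => (p:Int) = (m:Int) ∨ (m:Int) + (p:Int) = (n:Int) - 1) '#' n r2 f (by omega)]
      have hr2f : r2[f]? = some (if f = (n-1)/2 ∨ m = (n-1)/2 then '+' else '0') := by
        rw [hr2def]
        by_cases h : m = (n-1)/2
        · rw [if_pos h]
          rw [pvSetPass '+' n _ f (by simp [hf])]
          simp [hf, h]
        · rw [if_neg h]
          rw [List.getElem?_set]
          by_cases h2 : (n-1)/2 = f
          · simp [← h2, h, hcn]
          · have h2' : ¬ (f = (n-1)/2) := fun hh => h2 hh.symm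
            simp [h2, h2', h, hf, List.getElem?_replicate]
      rw [hr2f]
      have hfc : ((f:Int) = ((n-1 : Nat):Int)/2) ↔ f = (n-1)/2 := by omega
      have hmc : ((m:Int) = ((n-1 : Nat):Int)/2) ↔ m = (n-1)/2 := by omega
      by_cases hd : f = m ∨ (m:Int) + (f:Int) = (n:Int) - 1
      · simp [hd, hf]
      · simp [hd, hf, hfc, hmc]
    · have h1 : r2[f]? = none := by
        rw [List.getElem?_eq_none_iff]
        omega
      have h2 : ((List.range n).foldl
          (fun (r : List Char) (p : Nat) => if (p:Int) = (m:Int) ∨ (m:Int) + (p:Int) = (n:Int) - 1 then r.set p '#' else r) r2).length = n := by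
        rw [pvFoldlLenPres _ (by intro a b; split <;> simp)]
        exact hr2len
      rw [List.getElem?_eq_none_iff.mpr (by rw [h2]; omega),
        List.getElem?_eq_none_iff.mpr (by simp; omega)]

-- ===== VERDICT (by name: the statement is the Claim_ definition above) =====
theorem bandera_spec : Claim_equal_bandera := by
  intro L _
  unfold Spec_bandera
  exact bandera_spec_aux L
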